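-- pv_equiv track=rewrite | github.com/haoxuansxx/MachineLearning | moviesScore/moviesDataUtils.py | cloumnManyKeyListBlank
-- ===== SOURCE A (Python) =====
-- def cloumnManyKeyListBlank(dataList):
--     dataKey = {}
--     for datas in dataList:  # 语言
--         dataL = datas.split(" ")
--         for data in dataL:
--             if data in dataKey:
--                 dataKey[data] += 1
--             else:
--                 dataKey[data] = 1
--         pass
--     pass
--     return dataKey
-- ===== SOURCE B (Python) =====
-- def cloumnManyKeyListBlank(dataList):
--     tokens = [t for s in dataList for t in s.split(" ")]
--     return {t: tokens.count(t) for t in dict.fromkeys(tokens)}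
-- ===== Notes on version B (the rewrite author's own statement) =====
-- stated objective: simpler
-- what changed: Replaces the nested loops with in-dict mutation by a two-phase decomposition: flatten all tokens once, then build the result as a comprehension over the ordered distinct tokens with list.count.
import Mathlib
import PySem

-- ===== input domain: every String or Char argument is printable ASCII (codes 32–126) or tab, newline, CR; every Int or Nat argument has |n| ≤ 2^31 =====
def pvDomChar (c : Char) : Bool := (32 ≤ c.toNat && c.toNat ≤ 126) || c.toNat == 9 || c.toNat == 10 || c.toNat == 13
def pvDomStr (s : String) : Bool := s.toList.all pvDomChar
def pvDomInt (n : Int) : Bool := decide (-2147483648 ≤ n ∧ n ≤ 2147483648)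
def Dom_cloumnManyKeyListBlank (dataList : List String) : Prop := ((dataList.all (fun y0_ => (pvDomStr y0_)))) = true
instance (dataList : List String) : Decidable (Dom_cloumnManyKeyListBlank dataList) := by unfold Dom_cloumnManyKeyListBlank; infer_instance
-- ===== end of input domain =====

-- B replaces A's nested counting loops by flatten-then-count-per-distinct-token (simpler decomposition, same results).


-- s.split(" "): sep is the nonempty literal " ", so PySem.Str.split? always returns some (exact)
def pySplitSpace (s : String) : List String := (PySem.Str.split? s " ").getD []

-- ===== PORT A =====
def cloumnManyKeyListBlank (dataList : List String) : List (String × Int) :=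
  (dataList.foldl (fun dataKey datas =>
      (pySplitSpace datas).foldl (fun dk data =>
          if dk.contains data then dk.insert data (dk.getD data 0 + 1)
          else dk.insert data 1)
        dataKey)
    PySem.Dict.empty).items

-- ===== PORT B =====
def cloumnManyKeyListBlank_alt (dataList : List String) : List (String × Int) :=
  let tokens := dataList.flatMap (fun s => pySplitSpace s)
  (PySem.List.dedup tokens).map (fun t => (t, (tokens.count t : Int)))

-- ===== PRECONDITION & SPEC =====
def Spec_cloumnManyKeyListBlank (dataList : List String) (out : List (String × Int)) : Prop := out = cloumnManyKeyListBlank_alt dataList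
instance (dataList : List String) (out : List (String × Int)) : Decidable (Spec_cloumnManyKeyListBlank dataList out) := by unfold Spec_cloumnManyKeyListBlank; infer_instance

-- ===== CLAIM (what is proved, stated in full; the proofs are below) =====
def Claim_equal_cloumnManyKeyListBlank : Prop := ∀ (dataList : List String), Dom_cloumnManyKeyListBlank dataList → Spec_cloumnManyKeyListBlank dataList (cloumnManyKeyListBlank dataList)

-- ===== LEMMAS AND PROOFS =====

-- A's two branches are a single insert: when the key is absent, getD is the default 0.
theorem pvStep_eq (d : PySem.Dict String Int) (x : String) :
    (if d.contains x then d.insert x (d.getD x 0 + 1) else d.insert x 1)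
      = d.insert x (d.getD x 0 + 1) := by
  split_ifs with h
  · rfl
  · rw [PySem.Dict.getD_of_not_contains d 0 (by simpa using h)]
    norm_num

-- folding the inner loop over each string is folding over the flattened token list
theorem pvFoldl_flatMap {α β γ : Type} (l : List α) (g : α → List β)
    (f : γ → β → γ) (init : γ) :
    l.foldl (fun acc s => (g s).foldl f acc) init = (l.flatMap g).foldl f init := by
  induction l generalizing init with
  | nil => rfl
  | cons a t ih => simp [List.flatMap_cons, List.foldl_append, ih]

-- ===== VERDICT (by name: the statement is the Claim_ definition above) =====
theorem cloumnManyKeyListBlank_spec : Claim_equal_cloumnManyKeyListBlank := by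
  intro dataList _
  unfold Spec_cloumnManyKeyListBlank cloumnManyKeyListBlank cloumnManyKeyListBlank_alt
  have hstep : (fun (dk : PySem.Dict String Int) (data : String) =>
      if dk.contains data then dk.insert data (dk.getD data 0 + 1) else dk.insert data 1)
      = fun dk data => dk.insert data (dk.getD data 0 + 1) :=
    funext fun d => funext fun x => pvStep_eq d x
  simp only [hstep]
  rw [pvFoldl_flatMap]
  rw [PySem.Dict.foldl_insert_getD_add_one_eq_counter, PySem.Dict.items_counter]
  simp [PySem.List.dedup_eq_ofList]
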